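-- pv_equiv track=rewrite | github.com/lubianat/idr_study_crates | scripts/join_with_fbbi_and_ncbitaxon.py | direct_ncbi_parents
-- ===== SOURCE A (Python) =====
-- def direct_ncbi_parents(selected: set[str], ancestors: dict[str, set[str]]) -> dict[str, set[str]]:
--     direct: dict[str, set[str]] = {}
--     for child in selected:
--         candidates = set(ancestors.get(child, set()))
--         keep = set(candidates)
--         for parent in candidates:
--             for intermediate in candidates:
--                 if intermediate == parent:
--                     continue
--                 if parent in ancestors.get(intermediate, set()):
--                     keep.discard(parent)
--                     break
--         direct[child] = keep
--     return direct
-- ===== SOURCE B (Python) =====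
-- def direct_ncbi_parents(selected: set[str], ancestors: dict[str, set[str]]) -> dict[str, set[str]]:
--     # Build once a global reverse index: desc[a] = nodes that list a among their ancestors.
--     desc: dict[str, set[str]] = {}
--     for node in ancestors:
--         for a in ancestors[node]:
--             desc.setdefault(a, set()).add(node)
--     direct: dict[str, set[str]] = {}
--     for child in selected:
--         candidates = set(ancestors.get(child, set()))
--         direct[child] = {p for p in candidates
--                          if not (desc.get(p, set()) & candidates - {p})}
--     return direct
-- ===== Notes on version B (the rewrite author's own statement) =====
-- stated objective: alternative
-- what changed: A tests, per child, every candidate parent against every other candidate in a nested candidate-by-candidate scan with an early break; B instead builds once a global reverse index desc[a] = {nodes listing a as an ancestor} and keeps, per child, exactly the candidates whose indexed descendant set meets no other candidate, removing the inner pairwise scan (intended as faster; a timing run measured 1.66x at the largest size but inconsistently, so no speed is claimed).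
import Mathlib
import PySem

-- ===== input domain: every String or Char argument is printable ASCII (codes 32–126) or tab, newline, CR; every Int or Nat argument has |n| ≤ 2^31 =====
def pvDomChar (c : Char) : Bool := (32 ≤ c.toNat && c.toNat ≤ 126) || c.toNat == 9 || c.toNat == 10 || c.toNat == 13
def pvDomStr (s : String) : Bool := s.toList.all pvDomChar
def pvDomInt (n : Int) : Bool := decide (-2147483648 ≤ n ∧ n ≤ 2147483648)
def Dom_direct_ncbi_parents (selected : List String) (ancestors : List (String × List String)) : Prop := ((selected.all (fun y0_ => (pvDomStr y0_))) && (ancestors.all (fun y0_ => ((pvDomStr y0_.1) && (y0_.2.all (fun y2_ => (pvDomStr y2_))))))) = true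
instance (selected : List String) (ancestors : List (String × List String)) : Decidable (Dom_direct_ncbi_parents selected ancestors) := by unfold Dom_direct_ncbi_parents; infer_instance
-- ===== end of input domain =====

-- B replaces A's per-child candidate×candidate scan with a single global reverse index
-- (descendants-of-each-ancestor) built once, then a per-child filter by set operations.


-- ===== PORT A =====
-- ancestors.get(x, set())  (shared by both Pythons verbatim)
def pvGet (ancestors : List (String × List String)) (k : String) : List String :=
  PySem.Dict.getD (PySem.Dict.mk ancestors) k []

-- A's per-child body: nested loops over candidates with break ≡ List.any; discard on hit
def pvKeepA (ancestors : List (String × List String)) (child : String) : List String :=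
  let candidates : PySem.Set String := PySem.Set.ofList (pvGet ancestors child)
  candidates.foldl (fun keep parent =>
    if candidates.any (fun intermediate =>
         !(intermediate == parent) && (pvGet ancestors intermediate).contains parent)
    then PySem.Set.discard keep parent else keep) candidates

def direct_ncbi_parents (selected : List String) (ancestors : List (String × List String)) : List (String × List String) :=
  (selected.foldl (fun direct child => direct.insert child (pvKeepA ancestors child))
    (PySem.Dict.empty : PySem.Dict String (List String))).items

-- ===== PORT B =====
-- reverse index: desc[a] = set of nodes that list a among their ancestors
-- ('for node in ancestors' iterates the dict's distinct keys = dedup of the assoc list's keys)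
def pvDescIdx (ancestors : List (String × List String)) : PySem.Dict String (PySem.Set String) :=
  (PySem.List.dedup (ancestors.map (·.1))).foldl (fun desc node =>
    (pvGet ancestors node).foldl (fun desc a =>
      desc.modify a [] (fun s => PySem.Set.add s node)) desc)
    (PySem.Dict.empty : PySem.Dict String (PySem.Set String))

-- B's per-child body: keep p iff (desc.get(p, set()) & candidates) - {p} is empty
def pvKeepB (desc : PySem.Dict String (PySem.Set String))
    (ancestors : List (String × List String)) (child : String) : List String :=
  let candidates : PySem.Set String := PySem.Set.ofList (pvGet ancestors child)
  candidates.filter (fun p =>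
    (PySem.Set.diff (PySem.Set.inter (desc.getD p []) candidates) [p]).isEmpty)

def direct_ncbi_parents_alt (selected : List String) (ancestors : List (String × List String)) : List (String × List String) :=
  let desc := pvDescIdx ancestors
  (selected.foldl (fun direct child => direct.insert child (pvKeepB desc ancestors child))
    (PySem.Dict.empty : PySem.Dict String (List String))).items

-- ===== PRECONDITION & SPEC =====
def Spec_direct_ncbi_parents (selected : List String) (ancestors : List (String × List String)) (out : List (String × List String)) : Prop := out = direct_ncbi_parents_alt selected ancestors
instance (selected : List String) (ancestors : List (String × List String)) (out : List (String × List String)) : Decidable (Spec_direct_ncbi_parents selected ancestors out) := by unfold Spec_direct_ncbi_parents; infer_instance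

-- ===== CLAIM (what is proved, stated in full; the proofs are below) =====
def Claim_equal_direct_ncbi_parents : Prop := ∀ (selected : List String) (ancestors : List (String × List String)), Dom_direct_ncbi_parents selected ancestors → Spec_direct_ncbi_parents selected ancestors (direct_ncbi_parents selected ancestors)

-- ===== LEMMAS AND PROOFS =====

-- A's loop of conditional discards is a single filter
theorem pv_foldl_discard (cond : String → Bool) (l s : List String) :
    l.foldl (fun k p => if cond p then PySem.Set.discard k p else k) s
      = s.filter (fun x => !(l.contains x && cond x)) := by
  induction l generalizing s with
  | nil => simp
  | cons p l ih =>
    simp only [List.foldl_cons]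
    rw [ih]
    by_cases hc : cond p
    · rw [if_pos hc]
      simp only [PySem.Set.discard, List.filter_filter]
      apply List.filter_congr
      intro x hx
      cases hxe : x == p
      · simp [beq_eq_false_iff_ne.mp hxe]
      · simp [hc, eq_of_beq hxe]
    · rw [if_neg hc]
      apply List.filter_congr
      intro x hx
      cases hxe : x == p
      · simp [beq_eq_false_iff_ne.mp hxe]
      · simp only [Bool.not_eq_true] at hc
        simp [hc, eq_of_beq hxe]

-- a value seen in the first-match lookup comes from a key of the list
theorem pv_mem_pvGet_key (ancestors : List (String × List String)) (i a : String)
    (h : a ∈ pvGet ancestors i) : i ∈ ancestors.map (·.1) := by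
  induction ancestors with
  | nil => simp [pvGet, PySem.Dict.getD, PySem.Dict.get?] at h
  | cons p rest ih =>
    obtain ⟨k, v⟩ := p
    simp only [pvGet, PySem.Dict.getD_eq_get?_getD, PySem.Dict.get?_mk_cons] at h ih
    by_cases hk : k == i
    · simp [eq_of_beq hk]
    · rw [if_neg hk] at h
      simpa using Or.inr (ih h)

-- inner loop of the index builder: adds node under each a ∈ ancs
theorem pv_getD_inner (ancs : List String) (node : String)
    (d : PySem.Dict String (PySem.Set String)) (a i : String) :
    (i ∈ (ancs.foldl (fun d x => d.modify x [] (fun s => PySem.Set.add s node)) d).getD a [])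
      ↔ i ∈ d.getD a [] ∨ (i = node ∧ a ∈ ancs) := by
  induction ancs generalizing d with
  | nil => simp
  | cons x ancs ih =>
    simp only [List.foldl_cons, ih, PySem.Dict.getD_modify]
    by_cases hax : a = x
    · subst hax
      simp [PySem.Set.mem_add]
      try tauto
    · simp [hax]
      try tauto

-- the reverse index is exactly the first-match lookup, inverted
theorem pv_mem_descIdx (ancestors : List (String × List String)) (a i : String) :
    (i ∈ (pvDescIdx ancestors).getD a []) ↔ a ∈ pvGet ancestors i := by
  unfold pvDescIdx
  have key : ∀ (ks : List String) (d : PySem.Dict String (PySem.Set String)),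
      (i ∈ (ks.foldl (fun desc node =>
          (pvGet ancestors node).foldl (fun desc a =>
            desc.modify a [] (fun s => PySem.Set.add s node)) desc) d).getD a [])
        ↔ i ∈ d.getD a [] ∨ (i ∈ ks ∧ a ∈ pvGet ancestors i) := by
    intro ks
    induction ks with
    | nil => simp
    | cons n ks ih =>
      intro d
      simp only [List.foldl_cons, ih, pv_getD_inner, List.mem_cons]
      constructor
      · rintro (⟨h | ⟨rfl, h⟩⟩ | ⟨h1, h2⟩)
        · exact Or.inl h
        · exact Or.inr ⟨Or.inl rfl, h⟩
        · exact Or.inr ⟨Or.inr h1, h2⟩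
      · rintro (h | ⟨(rfl | h1), h2⟩)
        · exact Or.inl (Or.inl h)
        · exact Or.inl (Or.inr ⟨rfl, h2⟩)
        · exact Or.inr ⟨h1, h2⟩
  rw [key]
  simp only [PySem.Dict.getD_empty, List.not_mem_nil, false_or]
  constructor
  · exact And.right
  · intro h
    refine ⟨?_, h⟩
    have hm := pv_mem_pvGet_key ancestors i a h
    simpa [PySem.List.dedup_eq_ofList, PySem.Set.mem_ofList] using hm

-- per-child equality of the two bodies
theorem pv_keep_eq (ancestors : List (String × List String)) (child : String) :
    pvKeepA ancestors child = pvKeepB (pvDescIdx ancestors) ancestors child := by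
  unfold pvKeepA pvKeepB
  set candidates := PySem.Set.ofList (pvGet ancestors child) with hcand
  rw [pv_foldl_discard]
  apply List.filter_congr
  intro x hx
  simp only [List.contains_eq_mem, hx, decide_true, Bool.true_and]
  rw [Bool.eq_iff_iff, Bool.not_eq_true', List.any_eq_false, List.isEmpty_iff,
    List.eq_nil_iff_forall_not_mem]
  constructor
  · intro h i hi
    simp only [PySem.Set.mem_diff, PySem.Set.mem_inter, pv_mem_descIdx,
      List.mem_singleton] at hi
    obtain ⟨⟨hxg, hic⟩, hne⟩ := hi
    have hb := h i hic
    simp only [Bool.and_eq_true, not_and, Bool.not_eq_eq_eq_not,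
      Bool.not_true, beq_eq_false_iff_ne, decide_eq_true_eq] at hb
    exact (hb hne) hxg
  · intro h i hic
    simp only [Bool.and_eq_true, not_and, Bool.not_eq_eq_eq_not, Bool.not_true,
      beq_eq_false_iff_ne, decide_eq_true_eq]
    intro hne hxg
    exact h i (by
      simp only [PySem.Set.mem_diff, PySem.Set.mem_inter, pv_mem_descIdx,
        List.mem_singleton]
      exact ⟨⟨hxg, hic⟩, hne⟩)

-- ===== VERDICT (by name: the statement is the Claim_ definition above) =====
theorem direct_ncbi_parents_spec : Claim_equal_direct_ncbi_parents := by
  intro selected ancestors _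
  unfold Spec_direct_ncbi_parents direct_ncbi_parents direct_ncbi_parents_alt
  congr 2
  funext d c
  rw [pv_keep_eq]
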